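-- pv_equiv track=rewrite | github.com/Sandip-Maity-2023/Logic-building-with-Python | 020 problem.py | product_excluding_7
-- ===== SOURCE A (Python) =====
-- def product_excluding_7(values):
--     # Check if 7 is in the tuple
--     if 7 in values:
--         # Find the index of 7
--         index_7 = values.index(7)
--         # Get the values to the right of 7
--         values = values[index_7 + 1:]
--
--     # If no values remain after 7, return -1
--     if len(values) == 0:
--         return -1
--
--     # Calculate the product of the remaining values
--     product = 1
--     for value in values:
--         product *= value
--
--     return product
-- ===== SOURCE B (Python) =====
-- def product_excluding_7(values):
--     product, count, seen = 1, 0, False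
--     for v in values:
--         if v == 7 and not seen:
--             seen = True
--             product, count = 1, 0
--         else:
--             product *= v
--             count += 1
--     return product if count > 0 else -1
-- ===== Notes on version B (the rewrite author's own statement) =====
-- stated objective: simpler
-- what changed: Replaced membership test + index + slice + separate product loop by a single scan maintaining (product, count, seen-7) state, resetting once at the first 7.
import Mathlib
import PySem

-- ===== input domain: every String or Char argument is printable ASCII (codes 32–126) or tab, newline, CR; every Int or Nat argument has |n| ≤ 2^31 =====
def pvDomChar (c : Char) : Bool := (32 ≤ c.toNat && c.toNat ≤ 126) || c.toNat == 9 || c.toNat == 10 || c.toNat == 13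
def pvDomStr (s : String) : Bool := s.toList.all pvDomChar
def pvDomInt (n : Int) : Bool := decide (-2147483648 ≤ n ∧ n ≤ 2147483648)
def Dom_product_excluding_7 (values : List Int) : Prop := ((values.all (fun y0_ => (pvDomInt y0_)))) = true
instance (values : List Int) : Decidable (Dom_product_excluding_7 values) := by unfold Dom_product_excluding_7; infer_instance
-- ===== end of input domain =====

-- B is a single scan with a (product, count, seen) state instead of A's membership test + index + slice + product loop.

-- ===== PORT A =====
def product_excluding_7 (values : List Int) : Int :=
  -- if 7 in values: values = values[values.index(7) + 1 :]
  let values :=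
    if values.contains 7 then
      match PySem.List.index? values 7 with
      | some i => PySem.List.slice values (some ((i : Int) + 1)) none
      | none => values              -- unreachable: 7 ∈ values
    else values
  if values.length == 0 then -1
  else values.foldl (fun product value => product * value) 1

-- ===== PORT B =====
def pvStepB (st : Int × Int × Bool) (v : Int) : Int × Int × Bool :=
  if v == 7 && !st.2.2 then (1, 0, true)
  else (st.1 * v, st.2.1 + 1, st.2.2)

def product_excluding_7_alt (values : List Int) : Int :=
  let s := values.foldl pvStepB (1, 0, false)
  if s.2.1 > 0 then s.1 else -1

-- ===== PRECONDITION & SPEC =====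
def Spec_product_excluding_7 (values : List Int) (out : Int) : Prop := out = product_excluding_7_alt values
instance (values : List Int) (out : Int) : Decidable (Spec_product_excluding_7 values out) := by unfold Spec_product_excluding_7; infer_instance

-- ===== CLAIM (what is proved, stated in full; the proofs are below) =====
def Claim_equal_product_excluding_7 : Prop := ∀ (values : List Int), Dom_product_excluding_7 values → Spec_product_excluding_7 values (product_excluding_7 values)

-- ===== LEMMAS AND PROOFS =====

-- A's product loop accumulates the list product.
theorem pvFoldl_mul (xs : List Int) (p : Int) :
    xs.foldl (fun product value => product * value) p = p * xs.prod := by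
  induction xs generalizing p with
  | nil => simp
  | cons a xs ih => simp [List.foldl_cons, ih, mul_assoc]

-- Once seen = true, B's scan just multiplies and counts.
theorem pvStepB_seen (xs : List Int) (p c : Int) :
    xs.foldl pvStepB (p, c, true) = (p * xs.prod, c + xs.length, true) := by
  induction xs generalizing p c with
  | nil => simp
  | cons a xs ih =>
    have h : pvStepB (p, c, true) a = (p * a, c + 1, true) := by simp [pvStepB]
    rw [List.foldl_cons, h, ih]
    simp [Prod.ext_iff, mul_assoc]
    ring

-- Before a 7 is seen, the accumulated product and count are irrelevant if a 7 occurs.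
theorem pvStepB_unseen_mem (xs : List Int) (h : (7 : Int) ∈ xs) (p c : Int) :
    xs.foldl pvStepB (p, c, false) = xs.foldl pvStepB (1, 0, false) := by
  induction xs generalizing p c with
  | nil => simp at h
  | cons a xs ih =>
    by_cases ha : a = 7
    · subst ha; simp [List.foldl_cons, pvStepB]
    · have hx : (7 : Int) ∈ xs := by
        rcases List.mem_cons.mp h with h1 | h1
        · exact absurd h1.symm ha
        · exact h1
      have h1 : pvStepB (p, c, false) a = (p * a, c + 1, false) := by simp [pvStepB, ha]
      have h2 : pvStepB (1, 0, false) a = (1 * a, 0 + 1, false) := by simp [pvStepB, ha]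
      rw [List.foldl_cons, List.foldl_cons, h1, h2, ih hx]
      exact (ih hx _ _).symm

-- If no 7 occurs, B's scan is a plain product-and-count fold.
theorem pvStepB_unseen_not_mem (xs : List Int) (h : (7 : Int) ∉ xs) (p c : Int) :
    xs.foldl pvStepB (p, c, false) = (p * xs.prod, c + xs.length, false) := by
  induction xs generalizing p c with
  | nil => simp
  | cons a xs ih =>
    have ha : a ≠ 7 := fun hh => h (hh ▸ List.mem_cons_self)
    have hx : (7 : Int) ∉ xs := fun hh => h (List.mem_cons_of_mem _ hh)
    have h1 : pvStepB (p, c, false) a = (p * a, c + 1, false) := by simp [pvStepB, ha]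
    rw [List.foldl_cons, h1, ih hx]
    simp [Prod.ext_iff, mul_assoc]
    ring

theorem pvMain (values : List Int) :
    product_excluding_7 values = product_excluding_7_alt values := by
  induction values with
  | nil => decide
  | cons a xs ih =>
    by_cases ha : a = 7
    · -- head is the first 7: A works on xs, B flips seen at the head
      subst ha
      have hB : pvStepB (1, 0, false) 7 = (1, 0, true) := by simp [pvStepB]
      have hc : (7 :: xs).contains 7 = true := by simp
      simp only [product_excluding_7, product_excluding_7_alt, List.foldl_cons, hB,
        pvStepB_seen, PySem.List.index?_cons_self, hc, if_true]
      rw [PySem.List.slice_from _ (by omega)]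
      have t0 : (((0 : Nat) : Int) + 1).toNat = 1 := by omega
      rw [t0, List.drop_one, List.tail_cons, pvFoldl_mul]
      rcases xs with _ | ⟨b, ys⟩
      · simp
      · simp
    · by_cases hm : (7 : Int) ∈ xs
      · -- 7 occurs later: both sides reduce to the same computation on xs
        obtain ⟨i, hi⟩ := Option.isSome_iff_exists.mp
          ((PySem.List.index?_isSome_iff xs 7).mpr hm)
        have hiA : PySem.List.index? (a :: xs) 7 = some (i + 1) := by
          rw [PySem.List.index?_cons_of_ne xs ha, hi]; rfl
        have hcA : (a :: xs).contains 7 = true := by simp [hm]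
        have hcx : xs.contains 7 = true := by simp [hm]
        have e1 : product_excluding_7 (a :: xs) = product_excluding_7 xs := by
          simp only [product_excluding_7, hcA, hcx, if_pos, hiA, hi]
          rw [PySem.List.slice_from _ (by omega), PySem.List.slice_from _ (by omega)]
          have t1 : (((i + 1 : Nat) : Int) + 1).toNat = i + 2 := by omega
          have t2 : (((i : Nat) : Int) + 1).toNat = i + 1 := by omega
          rw [t1, t2, List.drop_succ_cons]
        have h1 : pvStepB (1, 0, false) a = (1 * a, 0 + 1, false) := by simp [pvStepB, ha]
        have e2 : product_excluding_7_alt (a :: xs) = product_excluding_7_alt xs := by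
          simp only [product_excluding_7_alt, List.foldl_cons, h1,
            pvStepB_unseen_mem xs hm]
        rw [e1, e2, ih]
      · -- no 7 anywhere: plain product of the whole list
        have hc : (a :: xs).contains 7 = false := by
          simp only [List.contains_eq_mem, decide_eq_false_iff_not, List.mem_cons, not_or]
          exact ⟨fun hh => ha hh.symm, hm⟩
        have h1 : pvStepB (1, 0, false) a = (1 * a, 0 + 1, false) := by simp [pvStepB, ha]
        simp only [product_excluding_7, product_excluding_7_alt, List.foldl_cons, h1,
          pvStepB_unseen_not_mem xs hm, hc, Bool.false_eq_true, if_false]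
        rw [if_neg (by simp), if_pos (by push_cast; omega), pvFoldl_mul]

-- ===== VERDICT (by name: the statement is the Claim_ definition above) =====
theorem product_excluding_7_spec : Claim_equal_product_excluding_7 := by
  intro values _
  exact pvMain values
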